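-- pv_equiv track=rewrite | github.com/Walczi123/Enriching-the-Monte-Carlo-Tree-Search-Algorithm | games/hive/common_functions.py | one_hive
-- ===== SOURCE A (Python) =====
-- def neighbours(coordinate):
--     """Returns cube hex neighbours"""
--     neighbours = [
--         (coordinate[0] + 1, coordinate[1]    ),
--         (coordinate[0]    , coordinate[1] + 1),
--         (coordinate[0] - 1, coordinate[1]    ),
--         (coordinate[0]    , coordinate[1] - 1),
--         ]
--     if coordinate[1] % 2:
--         neighbours.append((coordinate[0] - 1, coordinate[1] - 1))
--         neighbours.append((coordinate[0] - 1, coordinate[1] + 1))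
--     else:
--         neighbours.append((coordinate[0] + 1, coordinate[1] - 1))
--         neighbours.append((coordinate[0] + 1, coordinate[1] + 1))
--     return neighbours
--
-- def one_hive(coordinates):
--     unvisited = set(coordinates)
--     todo = [unvisited.pop()]
--     while todo:
--         node = todo.pop()
--         for neighbour in neighbours(node):
--             if neighbour in unvisited:
--                 unvisited.remove(neighbour)
--                 todo.append(neighbour)
--     return not unvisited
-- ===== SOURCE B (Python) =====
-- def neighbours(coordinate):
--     """Returns cube hex neighbours"""
--     neighbours = [
--         (coordinate[0] + 1, coordinate[1]    ),
--         (coordinate[0]    , coordinate[1] + 1),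
--         (coordinate[0] - 1, coordinate[1]    ),
--         (coordinate[0]    , coordinate[1] - 1),
--         ]
--     if coordinate[1] % 2:
--         neighbours.append((coordinate[0] - 1, coordinate[1] - 1))
--         neighbours.append((coordinate[0] - 1, coordinate[1] + 1))
--     else:
--         neighbours.append((coordinate[0] + 1, coordinate[1] - 1))
--         neighbours.append((coordinate[0] + 1, coordinate[1] + 1))
--     return neighbours
--
-- def one_hive(coordinates):
--     nodes = set(coordinates)
--     if not nodes:
--         return True
--     start = next(iter(nodes))
--     reach = {start}
--     for _ in range(len(coordinates)):
--         new = reach | {nb for v in reach for nb in neighbours(v) if nb in nodes}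
--         if new == reach:
--             break
--         reach = new
--     return nodes <= reach
-- ===== Notes on version B (the rewrite author's own statement) =====
-- stated objective: alternative
-- what changed: Replaces A's explicit-stack flood fill that destructively drains an 'unvisited' set with a round-based fixpoint iteration: B repeatedly unions the reached set with the in-hive neighbours of everything reached until it stabilizes, then tests nodes <= reach; B also returns True on empty input where A raises KeyError.
import Mathlib
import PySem

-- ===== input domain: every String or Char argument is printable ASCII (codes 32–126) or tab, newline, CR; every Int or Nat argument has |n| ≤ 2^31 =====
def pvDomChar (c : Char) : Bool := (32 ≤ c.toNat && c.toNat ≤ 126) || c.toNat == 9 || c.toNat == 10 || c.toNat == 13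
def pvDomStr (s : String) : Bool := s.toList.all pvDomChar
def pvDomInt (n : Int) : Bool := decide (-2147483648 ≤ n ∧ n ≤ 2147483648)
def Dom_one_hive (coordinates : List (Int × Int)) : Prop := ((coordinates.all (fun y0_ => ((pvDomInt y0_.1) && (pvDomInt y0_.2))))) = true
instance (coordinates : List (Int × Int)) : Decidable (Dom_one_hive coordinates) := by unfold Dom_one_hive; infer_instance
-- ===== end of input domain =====

-- B replaces A's explicit-stack flood fill (which drains an 'unvisited' set) by a round-based
-- fixpoint iteration of a reached set tested against the node set; alternative decomposition, not faster.

-- ===== PORT A =====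
-- helper 'neighbours' of the module, shared by both ports
def neighbours_py (coordinate : Int × Int) : List (Int × Int) :=
  let ns := [(coordinate.1 + 1, coordinate.2), (coordinate.1, coordinate.2 + 1),
             (coordinate.1 - 1, coordinate.2), (coordinate.1, coordinate.2 - 1)]
  if PySem.Int.mod coordinate.2 2 ≠ 0 then
    ns ++ [(coordinate.1 - 1, coordinate.2 - 1)] ++ [(coordinate.1 - 1, coordinate.2 + 1)]
  else
    ns ++ [(coordinate.1 + 1, coordinate.2 - 1)] ++ [(coordinate.1 + 1, coordinate.2 + 1)]

-- body of A's inner 'for neighbour in neighbours(node)' loop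
def hiveVisit (st : PySem.Set (Int × Int) × List (Int × Int)) (nb : Int × Int) :
    PySem.Set (Int × Int) × List (Int × Int) :=
  if PySem.Set.contains st.1 nb then (PySem.Set.discard st.1 nb, st.2 ++ [nb]) else st

-- termination measure bound for A's while loop (cited by decreasing_by)
lemma hiveVisit_sum_le (L : List (Int × Int)) : ∀ (u : PySem.Set (Int × Int)) (t : List (Int × Int)),
    (L.foldl hiveVisit (u, t)).1.length + (L.foldl hiveVisit (u, t)).2.length ≤ u.length + t.length := by
  induction L with
  | nil => simp
  | cons nb L ih =>
    intro u t
    simp only [List.foldl_cons, hiveVisit]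
    split
    · rename_i hc
      have hmem : nb ∈ u := by simpa [PySem.Set.contains_iff] using hc
      have hlt : (PySem.Set.discard u nb).length < u.length := by
        simp only [PySem.Set.discard]
        rw [List.length_filter_lt_length_iff_exists]
        exact ⟨nb, hmem, by simp⟩
      have := ih (PySem.Set.discard u nb) (t ++ [nb])
      simp only [List.length_append, List.length_cons, List.length_nil] at this ⊢
      omega
    · exact ih u t

-- A's while loop: state (unvisited, todo); todo.pop() pops the last element
def oneHiveLoop (unvisited : PySem.Set (Int × Int)) (todo : List (Int × Int)) : Bool :=
  if h : todo = [] then unvisited.isEmpty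
  else
    let st := (neighbours_py (todo.getLast h)).foldl hiveVisit (unvisited, todo.dropLast)
    oneHiveLoop st.1 st.2
termination_by unvisited.length + todo.length
decreasing_by
  have h1 := hiveVisit_sum_le (neighbours_py (todo.getLast h)) unvisited todo.dropLast
  have h2 : todo.dropLast.length + 1 = todo.length := by
    cases todo with
    | nil => exact absurd rfl h
    | cons a l => simp
  omega

def one_hive (coordinates : List (Int × Int)) : Bool :=
  -- unvisited.pop(): Python set.pop takes an arbitrary element; modelled as the first one.
  -- On [] Python raises KeyError (excluded by Pre_); the port returns false there.
  match PySem.Set.ofList coordinates with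
  | [] => false
  | s :: rest => oneHiveLoop rest [s]

-- ===== PORT B =====
-- one round: reach | {nb for v in reach for nb in neighbours(v) if nb in nodes}
def hiveExpand (nodes reach : PySem.Set (Int × Int)) : PySem.Set (Int × Int) :=
  PySem.Set.union reach
    (PySem.Set.ofList ((reach.flatMap neighbours_py).filter (fun nb => PySem.Set.contains nodes nb)))

-- B's for-loop over range(len(coordinates)) with early break on stabilization
def oneHiveAltLoop (nodes : PySem.Set (Int × Int)) (reach : PySem.Set (Int × Int)) :
    Nat → PySem.Set (Int × Int)
  | 0 => reach
  | Nat.succ k =>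
    let new := hiveExpand nodes reach
    if PySem.Set.equal new reach then reach else oneHiveAltLoop nodes new k

def one_hive_alt (coordinates : List (Int × Int)) : Bool :=
  let nodes := PySem.Set.ofList coordinates
  match nodes with
  | [] => true
  | start :: _ =>
    PySem.Set.issubset nodes
      (oneHiveAltLoop nodes (PySem.Set.add PySem.Set.empty start) coordinates.length)

-- ===== PRECONDITION & SPEC =====
-- Pre_ excludes only the empty list, on which A raises KeyError (set.pop from an empty set).
def Pre_one_hive (coordinates : List (Int × Int)) : Prop := coordinates ≠ []
instance (coordinates : List (Int × Int)) : Decidable (Pre_one_hive coordinates) := by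
  unfold Pre_one_hive; infer_instance

def pvWitness_one_hive : (List (Int × Int)) := [(0, 0), (1, 0)]

def Spec_one_hive (coordinates : List (Int × Int)) (out : Bool) : Prop := out = one_hive_alt coordinates
instance (coordinates : List (Int × Int)) (out : Bool) : Decidable (Spec_one_hive coordinates out) := by
  unfold Spec_one_hive; infer_instance

-- ===== CLAIM (what is proved, stated in full; the proofs are below) =====
def Claim_equal_one_hive : Prop := ∀ (coordinates : List (Int × Int)), Dom_one_hive coordinates → Pre_one_hive coordinates → Spec_one_hive coordinates (one_hive coordinates)


-- ===== LEMMAS AND PROOFS =====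

-- adjacency restricted to the hive's node set, and reachability
def HAdj (V : List (Int × Int)) (a b : Int × Int) : Prop := b ∈ neighbours_py a ∧ b ∈ V
def HReach (V : List (Int × Int)) (s v : Int × Int) : Prop := Relation.ReflTransGen (HAdj V) s v

lemma hreach_mem_of_closed (V : List (Int × Int)) (S : Int × Int → Prop) (s v : Int × Int)
    (hs : S s) (hcl : ∀ a, S a → ∀ b ∈ neighbours_py a, b ∈ V → S b)
    (h : HReach V s v) : S v := by
  induction h with
  | refl => exact hs
  | tail _ h2 ih => exact hcl _ ih _ h2.1 h2.2

-- invariants carried through A's inner for-loop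
lemma hiveVisit_fold_spec (V : List (Int × Int)) (node : Int × Int) :
    ∀ (L u t : List (Int × Int)),
    (∀ x ∈ t, x ∉ u) →
    (∀ b ∈ neighbours_py node, b ∈ V → b ∉ u ∨ b ∈ L) →
    (∀ x ∈ (L.foldl hiveVisit (u, t)).1, x ∈ u) ∧
    (∀ x ∈ t, x ∈ (L.foldl hiveVisit (u, t)).2) ∧
    (∀ x ∈ (L.foldl hiveVisit (u, t)).2, x ∈ t ∨ (x ∈ L ∧ x ∈ u)) ∧
    (∀ x ∈ u, x ∉ (L.foldl hiveVisit (u, t)).1 → x ∈ L ∧ x ∈ (L.foldl hiveVisit (u, t)).2) ∧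
    (∀ x ∈ (L.foldl hiveVisit (u, t)).2, x ∉ (L.foldl hiveVisit (u, t)).1) ∧
    (∀ b ∈ neighbours_py node, b ∈ V → b ∉ (L.foldl hiveVisit (u, t)).1) := by
  intro L
  induction L with
  | nil =>
    intro u t ht hcov
    refine ⟨fun x hx => hx, fun x hx => hx, fun x hx => Or.inl hx,
      fun x hx hnx => absurd hx hnx, ht, fun b hb hbV => ?_⟩
    rcases hcov b hb hbV with h | h
    · exact h
    · exact absurd h (List.not_mem_nil)
  | cons nb L ih =>
    intro u t ht hcov
    simp only [List.foldl_cons, hiveVisit]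
    by_cases hc : PySem.Set.contains u nb = true
    · simp only [hc, if_pos]
      have hmem : nb ∈ u := (PySem.Set.contains_iff u nb).mp hc
      have hnbd : nb ∉ PySem.Set.discard u nb := by
        intro h; exact absurd ((PySem.Set.mem_discard u nb nb).mp h).2 (by simp)
      have hdsub : ∀ x, x ∈ PySem.Set.discard u nb → x ∈ u :=
        fun x h => ((PySem.Set.mem_discard u nb x).mp h).1
      have ht' : ∀ x ∈ t ++ [nb], x ∉ PySem.Set.discard u nb := by
        intro x hx
        rcases List.mem_append.mp hx with h | h
        · exact fun hxd => ht x h (hdsub x hxd)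
        · simp only [List.mem_singleton] at h; subst h; exact hnbd
      have hcov' : ∀ b ∈ neighbours_py node, b ∈ V → b ∉ PySem.Set.discard u nb ∨ b ∈ L := by
        intro b hb hbV
        rcases hcov b hb hbV with h | h
        · exact Or.inl (fun hx => h (hdsub b hx))
        · rcases List.mem_cons.mp h with h | h
          · subst h; exact Or.inl hnbd
          · exact Or.inr h
      obtain ⟨c1, c2, c3, c4, c5, c6⟩ := ih (PySem.Set.discard u nb) (t ++ [nb]) ht' hcov'
      refine ⟨fun x hx => hdsub x (c1 x hx), ?_, ?_, ?_, c5, c6⟩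
      · exact fun x hx => c2 x (List.mem_append.mpr (Or.inl hx))
      · intro x hx
        rcases c3 x hx with h | ⟨hL, hu⟩
        · rcases List.mem_append.mp h with h | h
          · exact Or.inl h
          · simp only [List.mem_singleton] at h; subst h
            exact Or.inr ⟨List.mem_cons_self, hmem⟩
        · exact Or.inr ⟨List.mem_cons.mpr (Or.inr hL), hdsub x hu⟩
      · intro x hxu hxn
        by_cases hxd : x ∈ PySem.Set.discard u nb
        · obtain ⟨hL, hr⟩ := c4 x hxd hxn
          exact ⟨List.mem_cons.mpr (Or.inr hL), hr⟩
        · have hx : x = nb := by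
            by_contra hne
            exact hxd ((PySem.Set.mem_discard u nb x).mpr ⟨hxu, hne⟩)
          subst hx
          exact ⟨List.mem_cons_self, c2 _ (List.mem_append.mpr (Or.inr (List.mem_singleton_self _)))⟩
    · simp only [hc, if_neg, Bool.false_eq_true, not_false_iff]
      have hnmem : nb ∉ u := fun h => hc ((PySem.Set.contains_iff u nb).mpr h)
      have hcov' : ∀ b ∈ neighbours_py node, b ∈ V → b ∉ u ∨ b ∈ L := by
        intro b hb hbV
        rcases hcov b hb hbV with h | h
        · exact Or.inl h
        · rcases List.mem_cons.mp h with h | h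
          · subst h; exact Or.inl hnmem
          · exact Or.inr h
      obtain ⟨c1, c2, c3, c4, c5, c6⟩ := ih u t ht hcov'
      refine ⟨c1, c2, ?_, ?_, c5, c6⟩
      · intro x hx
        rcases c3 x hx with h | ⟨hL, hu⟩
        · exact Or.inl h
        · exact Or.inr ⟨List.mem_cons.mpr (Or.inr hL), hu⟩
      · intro x hxu hxn
        obtain ⟨hL, hr⟩ := c4 x hxu hxn
        exact ⟨List.mem_cons.mpr (Or.inr hL), hr⟩

-- characterization of A's while loop
lemma oneHiveLoop_spec (V : List (Int × Int)) (s : Int × Int) :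
    ∀ (n : Nat) (u todo : List (Int × Int)), u.length + todo.length ≤ n →
    (∀ x ∈ u, x ∈ V) →
    (∀ x ∈ todo, x ∈ V ∧ x ∉ u) →
    s ∈ V → s ∉ u →
    (∀ x ∈ V, x ∉ u → HReach V s x) →
    (∀ x ∈ V, x ∉ u → x ∉ todo → ∀ b ∈ neighbours_py x, b ∈ V → b ∉ u) →
    (oneHiveLoop u todo = true ↔ ∀ v ∈ V, HReach V s v) := by
  intro n
  induction n with
  | zero =>
    intro u todo hlen h1 h2 hsV hsu h5 h6
    have htodo : todo = [] := by
      cases todo with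
      | nil => rfl
      | cons a l => simp at hlen
    subst htodo
    rw [oneHiveLoop]
    simp only [reduceDIte]
    constructor
    · intro hu v hv
      have : u = [] := List.isEmpty_iff.mp hu
      exact h5 v hv (by simp [this])
    · intro hall
      have hu : u = [] := by
        cases u with
        | nil => rfl
        | cons a l => simp at hlen
      simp [hu]
  | succ k ih =>
    intro u todo hlen h1 h2 hsV hsu h5 h6
    by_cases htodo : todo = []
    · subst htodo
      rw [oneHiveLoop]
      simp only [reduceDIte]
      constructor
      · intro hu v hv
        have : u = [] := List.isEmpty_iff.mp hu
        exact h5 v hv (by simp [this])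
      · intro hall
        rw [List.isEmpty_iff]
        by_contra hne
        obtain ⟨x, hx⟩ := List.exists_mem_of_ne_nil u hne
        have hS : x ∈ V ∧ x ∉ u := by
          refine hreach_mem_of_closed V (fun y => y ∈ V ∧ y ∉ u) s x ⟨hsV, hsu⟩ ?_ (hall x (h1 x hx))
          intro a ha b hb hbV
          exact ⟨hbV, h6 a ha.1 ha.2 (List.not_mem_nil) b hb hbV⟩
        exact hS.2 hx
    · rw [oneHiveLoop]
      simp only [dif_neg htodo]
      set node := todo.getLast htodo with hnodedef
      set rest := todo.dropLast with hrestdef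
      have hsplit : rest ++ [node] = todo := List.dropLast_append_getLast htodo
      have hnodetodo : node ∈ todo := List.getLast_mem htodo
      obtain ⟨hnV, hnu⟩ := h2 node hnodetodo
      have ht' : ∀ x ∈ rest, x ∉ u := by
        intro x hx
        exact (h2 x (by rw [← hsplit]; exact List.mem_append.mpr (Or.inl hx))).2
      have hcov' : ∀ b ∈ neighbours_py node, b ∈ V → b ∉ u ∨ b ∈ neighbours_py node :=
        fun b hb _ => Or.inr hb
      obtain ⟨c1, c2, c3, c4, c5, c6⟩ := hiveVisit_fold_spec V node (neighbours_py node) u rest ht' hcov'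
      set r := (neighbours_py node).foldl hiveVisit (u, rest) with hrdef
      have hlen' : r.1.length + r.2.length ≤ k := by
        have hs1 := hiveVisit_sum_le (neighbours_py node) u rest
        have hs2 : rest.length + 1 = todo.length := by
          rw [← hsplit]; simp
        rw [← hrdef] at hs1
        omega
      refine ih r.1 r.2 hlen' (fun x hx => h1 x (c1 x hx)) ?_ hsV (fun h => hsu (c1 s h)) ?_ ?_
      · intro x hx
        refine ⟨?_, c5 x hx⟩
        rcases c3 x hx with h | ⟨_, hu⟩
        · exact (h2 x (by rw [← hsplit]; exact List.mem_append.mpr (Or.inl h))).1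
        · exact h1 x hu
      · intro x hxV hxr
        by_cases hxu : x ∈ u
        · obtain ⟨hL, _⟩ := c4 x hxu hxr
          exact Relation.ReflTransGen.tail (h5 node hnV hnu) ⟨hL, hxV⟩
        · exact h5 x hxV hxu
      · intro x hxV hxr1 hxr2 b hb hbV
        by_cases hxu : x ∈ u
        · exact absurd (c4 x hxu hxr1).2 hxr2
        · by_cases hxn : x = node
          · subst hxn; exact c6 b hb hbV
          · have hxt : x ∉ todo := by
              rw [← hsplit]
              intro hx
              rcases List.mem_append.mp hx with h | h
              · exact hxr2 (c2 x h)
              · simp only [List.mem_singleton] at h; exact hxn h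
            intro hbr
            exact h6 x hxV hxu hxt b hb hbV (c1 b hbr)

lemma mem_hiveExpand (V reach : List (Int × Int)) (y : Int × Int) :
    y ∈ hiveExpand V reach ↔ y ∈ reach ∨ ((∃ v ∈ reach, y ∈ neighbours_py v) ∧ y ∈ V) := by
  simp only [hiveExpand, PySem.Set.mem_union, PySem.Set.mem_ofList, List.mem_filter,
    List.mem_flatMap, PySem.Set.contains_eq_listContains, List.contains_iff_mem]

lemma full_of_le_length (V reach : List (Int × Int)) (hnd : reach.Nodup)
    (hsub : ∀ x ∈ reach, x ∈ V) (hlen : V.length ≤ reach.length) : ∀ x ∈ V, x ∈ reach := by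
  have hsp : List.Subperm reach V := hnd.subperm (fun {x} hx => hsub x hx)
  have hperm : List.Perm reach V := hsp.perm_of_length_le hlen
  intro x hx
  exact hperm.mem_iff.mpr hx

lemma hiveExpand_grow (V reach : List (Int × Int)) (hnd : reach.Nodup)
    (h : PySem.Set.equal (hiveExpand V reach) reach = false) :
    reach.length + 1 ≤ (hiveExpand V reach).length := by
  have hsub : ∀ x ∈ reach, x ∈ hiveExpand V reach :=
    fun x hx => (mem_hiveExpand V reach x).mpr (Or.inl hx)
  have hsp : List.Subperm reach (hiveExpand V reach) := hnd.subperm (fun {x} hx => hsub x hx)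
  have hle := hsp.length_le
  rcases Nat.lt_or_ge reach.length (hiveExpand V reach).length with hlt | hge
  · omega
  · exfalso
    have hperm : List.Perm reach (hiveExpand V reach) := hsp.perm_of_length_le hge
    have : PySem.Set.equal (hiveExpand V reach) reach = true := by
      rw [PySem.Set.equal_iff]
      intro x
      exact (hperm.mem_iff (a := x)).symm
    simp [this] at h

-- characterization of B's loop
lemma oneHiveAltLoop_spec (V : List (Int × Int)) (s : Int × Int) :
    ∀ (fuel : Nat) (reach : List (Int × Int)),
    reach.Nodup → (∀ x ∈ reach, x ∈ V) → s ∈ reach →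
    (∀ x ∈ reach, HReach V s x) →
    V.length ≤ reach.length + fuel →
    (∀ x ∈ oneHiveAltLoop V reach fuel, HReach V s x) ∧ s ∈ oneHiveAltLoop V reach fuel ∧
    (∀ a ∈ oneHiveAltLoop V reach fuel, ∀ b ∈ neighbours_py a, b ∈ V → b ∈ oneHiveAltLoop V reach fuel) := by
  intro fuel
  induction fuel with
  | zero =>
    intro reach hnd hsub hs hsound hlen
    simp only [oneHiveAltLoop]
    refine ⟨hsound, hs, ?_⟩
    intro a ha b hb hbV
    exact full_of_le_length V reach hnd hsub (by omega) b hbV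
  | succ k ih =>
    intro reach hnd hsub hs hsound hlen
    simp only [oneHiveAltLoop]
    by_cases heq : PySem.Set.equal (hiveExpand V reach) reach = true
    · simp only [heq, if_pos]
      refine ⟨hsound, hs, ?_⟩
      intro a ha b hb hbV
      have : b ∈ hiveExpand V reach := (mem_hiveExpand V reach b).mpr (Or.inr ⟨⟨a, ha, hb⟩, hbV⟩)
      exact (PySem.Set.equal_iff _ _).mp heq b |>.mp this
    · rw [Bool.not_eq_true] at heq
      simp only [heq, Bool.false_eq_true, if_false]
      have hnd' : (hiveExpand V reach).Nodup := PySem.Set.nodup_union reach _ hnd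
      have hsub' : ∀ x ∈ hiveExpand V reach, x ∈ V := by
        intro x hx
        rcases (mem_hiveExpand V reach x).mp hx with h | ⟨_, hV⟩
        · exact hsub x h
        · exact hV
      have hs' : s ∈ hiveExpand V reach := (mem_hiveExpand V reach s).mpr (Or.inl hs)
      have hsound' : ∀ x ∈ hiveExpand V reach, HReach V s x := by
        intro x hx
        rcases (mem_hiveExpand V reach x).mp hx with h | ⟨⟨v, hv, hnb⟩, hV⟩
        · exact hsound x h
        · exact Relation.ReflTransGen.tail (hsound v hv) ⟨hnb, hV⟩
      have hgrow := hiveExpand_grow V reach hnd heq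
      exact ih (hiveExpand V reach) hnd' hsub' hs' hsound' (by omega)

-- ===== VERDICT (by name: the statement is the Claim_ definition above) =====
theorem one_hive_spec : Claim_equal_one_hive := by
  intro coords _ hpre
  unfold Spec_one_hive
  have hne : PySem.Set.ofList coords ≠ [] := by
    cases coords with
    | nil => exact absurd rfl hpre
    | cons c cs =>
      intro h
      have hc : c ∈ PySem.Set.ofList (c :: cs) :=
        (PySem.Set.mem_ofList (c :: cs) c).mpr List.mem_cons_self
      rw [h] at hc
      exact List.not_mem_nil hc
  obtain ⟨s, rest, hV⟩ := List.exists_cons_of_ne_nil hne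
  have hVnd : (PySem.Set.ofList coords).Nodup := PySem.Set.nodup_ofList coords
  have hsrest : s ∉ rest := (List.nodup_cons.mp (hV ▸ hVnd)).1
  have hsV : s ∈ PySem.Set.ofList coords := by rw [hV]; exact List.mem_cons_self
  have hrestV : ∀ x ∈ rest, x ∈ PySem.Set.ofList coords := by
    intro x hx; rw [hV]; exact List.mem_cons.mpr (Or.inr hx)
  have hAdef : one_hive coords = oneHiveLoop rest [s] := by
    unfold one_hive; rw [hV]
  have hA : one_hive coords = true ↔ ∀ v ∈ PySem.Set.ofList coords, HReach (PySem.Set.ofList coords) s v := by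
    rw [hAdef]
    refine oneHiveLoop_spec (PySem.Set.ofList coords) s (rest.length + 1) rest [s] (by simp)
      hrestV ?_ hsV hsrest ?_ ?_
    · intro x hx
      simp only [List.mem_singleton] at hx; subst hx
      exact ⟨hsV, hsrest⟩
    · intro x hxV hxr
      rw [hV] at hxV
      rcases List.mem_cons.mp hxV with h | h
      · subst h; exact Relation.ReflTransGen.refl
      · exact absurd h hxr
    · intro x hxV hxr hxs
      rw [hV] at hxV
      rcases List.mem_cons.mp hxV with h | h
      · subst h; exact absurd (List.mem_singleton.mpr rfl) hxs
      · exact absurd h hxr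
  have hBdef : one_hive_alt coords =
      PySem.Set.issubset (PySem.Set.ofList coords)
        (oneHiveAltLoop (PySem.Set.ofList coords) [s] coords.length) := by
    unfold one_hive_alt
    rw [hV]
    rfl
  obtain ⟨Rs, hsR, Rcl⟩ := oneHiveAltLoop_spec (PySem.Set.ofList coords) s coords.length [s]
    (by simp) (by intro x hx; simp only [List.mem_singleton] at hx; subst hx; exact hsV)
    List.mem_cons_self
    (by intro x hx; simp only [List.mem_singleton] at hx; subst hx; exact Relation.ReflTransGen.refl)
    (by have := PySem.Set.length_ofList_le coords; simp only [List.length_cons, List.length_nil]; omega)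
  have hB : one_hive_alt coords = true ↔ ∀ v ∈ PySem.Set.ofList coords, HReach (PySem.Set.ofList coords) s v := by
    rw [hBdef, PySem.Set.issubset_iff]
    constructor
    · intro h v hv
      exact Rs v (h v hv)
    · intro hall x hx
      exact hreach_mem_of_closed (PySem.Set.ofList coords)
        (fun y => y ∈ oneHiveAltLoop (PySem.Set.ofList coords) [s] coords.length) s x hsR
        (fun a ha b hb hbV => Rcl a ha b hb hbV) (hall x hx)
  rw [Bool.eq_iff_iff, hA, hB]
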